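-- pv_equiv track=rewrite | github.com/CyberSecurityUP/Mary-Poppins-Intelligence | backend/services/darkweb/service.py | _categorize_page
-- ===== SOURCE A (Python) =====
-- from enum import Enum
-- from typing import Any, Optional
--
-- class SiteCategory(str, Enum):
--     FORUM = "forum"
--     MARKETPLACE = "marketplace"
--     PASTE_SITE = "paste_site"
--     IMAGE_BOARD = "image_board"
--     BLOG = "blog"
--     COMMUNICATION = "communication"
--     HOSTING = "hosting"
--     CRYPTOCURRENCY = "cryptocurrency"
--     UNKNOWN = "unknown"
--
-- def _categorize_page(text: str, title: Optional[str], url: str) -> SiteCategory: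
--     """Categorize a dark web page based on content metadata."""
--     combined = f"{title or ''} {text[:2000]}".lower()
--
--     if any(w in combined for w in ["forum", "thread", "reply", "post", "discussion"]):
--         return SiteCategory.FORUM
--     if any(w in combined for w in ["vendor", "listing", "add to cart", "escrow", "marketplace"]):
--         return SiteCategory.MARKETPLACE
--     if any(w in combined for w in ["paste", "hastebin", "pastebin"]):
--         return SiteCategory.PASTE_SITE
--     if any(w in combined for w in ["hosting", "bulletproof", "server", "vps"]):
--         return SiteCategory.HOSTING
--
--     return SiteCategory.UNKNOWN
-- ===== SOURCE B (Python) =====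
-- from enum import Enum
-- from typing import Optional
--
-- class SiteCategory(str, Enum):
--     FORUM = "forum"
--     MARKETPLACE = "marketplace"
--     PASTE_SITE = "paste_site"
--     IMAGE_BOARD = "image_board"
--     BLOG = "blog"
--     COMMUNICATION = "communication"
--     HOSTING = "hosting"
--     CRYPTOCURRENCY = "cryptocurrency"
--     UNKNOWN = "unknown"
--
-- # keyword -> priority (0 = FORUM .. 3 = HOSTING); priorities index _CATS
-- _KEYWORDS = {
--     "forum": 0, "thread": 0, "reply": 0, "post": 0, "discussion": 0,
--     "vendor": 1, "listing": 1, "add to cart": 1, "escrow": 1, "marketplace": 1,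
--     "paste": 2, "hastebin": 2, "pastebin": 2,
--     "hosting": 3, "bulletproof": 3, "server": 3, "vps": 3,
-- }
-- _CATS = [SiteCategory.FORUM, SiteCategory.MARKETPLACE,
--          SiteCategory.PASTE_SITE, SiteCategory.HOSTING]
--
-- def _categorize_page(text: str, title: Optional[str], url: str) -> SiteCategory:
--     combined = f"{title or ''} {text[:2000]}".lower()
--     # single left-to-right pass over the haystack: at each position record the
--     # best (lowest) priority of any keyword starting there
--     best = len(_CATS)
--     for i in range(len(combined)):
--         for w, p in _KEYWORDS.items():
--             if p < best and combined.startswith(w, i):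
--                 best = p
--     return _CATS[best] if best < len(_CATS) else SiteCategory.UNKNOWN
-- ===== Notes on version B (the rewrite author's own statement) =====
-- stated objective: alternative
-- what changed: Instead of per-keyword containment tests with early return per category, B makes a single left-to-right pass over every position of the combined string, checking all keyword prefixes at each position and keeping the best (lowest) category priority in an accumulator; the category is read off the accumulator at the end.
import Mathlib
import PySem

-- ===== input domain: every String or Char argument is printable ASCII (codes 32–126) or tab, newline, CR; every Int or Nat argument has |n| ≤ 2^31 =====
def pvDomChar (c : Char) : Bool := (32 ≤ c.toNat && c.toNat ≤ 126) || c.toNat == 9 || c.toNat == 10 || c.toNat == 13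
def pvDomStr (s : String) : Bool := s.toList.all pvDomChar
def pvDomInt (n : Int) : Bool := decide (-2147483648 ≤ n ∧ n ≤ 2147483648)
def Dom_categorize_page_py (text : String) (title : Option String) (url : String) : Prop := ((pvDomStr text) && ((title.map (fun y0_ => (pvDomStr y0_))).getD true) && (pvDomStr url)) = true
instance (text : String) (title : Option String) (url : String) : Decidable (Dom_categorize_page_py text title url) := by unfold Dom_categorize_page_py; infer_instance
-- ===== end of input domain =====

-- B replaces A's per-keyword containment tests with a single positional pass over the
-- combined string keeping a min-priority accumulator (alternative algorithm, same cost).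

-- ===== PORT A =====
-- combined = f"{title or ''} {text[:2000]}".lower(); four if-any chains, early return
def categorize_page_py (text : String) (title : Option String) (url : String) : String :=
  let combined : List Char :=
    PySem.Chars.lower ((title.getD "").toList ++ ' ' :: PySem.Chars.slice text.toList none (some 2000))
  if (["forum", "thread", "reply", "post", "discussion"].any
        (fun w => PySem.Chars.isIn w.toList combined)) then "forum"
  else if (["vendor", "listing", "add to cart", "escrow", "marketplace"].any
        (fun w => PySem.Chars.isIn w.toList combined)) then "marketplace"
  else if (["paste", "hastebin", "pastebin"].any
        (fun w => PySem.Chars.isIn w.toList combined)) then "paste_site"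
  else if (["hosting", "bulletproof", "server", "vps"].any
        (fun w => PySem.Chars.isIn w.toList combined)) then "hosting"
  else "unknown"

-- ===== PORT B =====
-- Source B's _KEYWORDS dict (keyword -> category priority), insertion order
def pvKeywords : List (List Char × Nat) :=
  [("forum".toList, 0), ("thread".toList, 0), ("reply".toList, 0), ("post".toList, 0),
   ("discussion".toList, 0),
   ("vendor".toList, 1), ("listing".toList, 1), ("add to cart".toList, 1),
   ("escrow".toList, 1), ("marketplace".toList, 1),
   ("paste".toList, 2), ("hastebin".toList, 2), ("pastebin".toList, 2),
   ("hosting".toList, 3), ("bulletproof".toList, 3), ("server".toList, 3), ("vps".toList, 3)]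

-- Source B's _CATS
def pvCats : List String := ["forum", "marketplace", "paste_site", "hosting"]

-- the inner loop: at one position (suffix s) update best with any keyword starting there
def pvStep (s : List Char) (best : Nat) : Nat :=
  pvKeywords.foldl (fun b wp => if wp.2 < b ∧ wp.1.isPrefixOf s then wp.2 else b) best

-- the outer loop: i over range(len(combined)) = the nonempty suffixes, left to right
def pvScan : List Char → Nat → Nat
  | [], best => best
  | c :: t, best => pvScan t (pvStep (c :: t) best)

def categorize_page_py_alt (text : String) (title : Option String) (url : String) : String :=
  let combined : List Char :=
    PySem.Chars.lower ((title.getD "").toList ++ ' ' :: PySem.Chars.slice text.toList none (some 2000))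
  let best := pvScan combined pvCats.length
  if best < pvCats.length then pvCats.getD best "unknown" else "unknown"

-- ===== PRECONDITION & SPEC =====
def Spec_categorize_page_py (text : String) (title : Option String) (url : String) (out : String) : Prop := out = categorize_page_py_alt text title url
instance (text : String) (title : Option String) (url : String) (out : String) : Decidable (Spec_categorize_page_py text title url out) := by unfold Spec_categorize_page_py; infer_instance

-- ===== CLAIM (what is proved, stated in full; the proofs are below) =====
def Claim_equal_categorize_page_py : Prop := ∀ (text : String) (title : Option String) (url : String), Dom_categorize_page_py text title url → Spec_categorize_page_py text title url (categorize_page_py text title url)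

-- ===== LEMMAS AND PROOFS =====

-- the inner fold computes the min of best and the priorities whose keyword starts at s
theorem pvFold_le_iff (s : List Char) (ks : List (List Char × Nat)) (b p : Nat) :
    (ks.foldl (fun b wp => if wp.2 < b ∧ wp.1.isPrefixOf s then wp.2 else b) b ≤ p)
      ↔ (b ≤ p ∨ ∃ wp ∈ ks, wp.2 ≤ p ∧ wp.1 <+: s) := by
  induction ks generalizing b with
  | nil => simp
  | cons wp rest ih =>
      simp only [List.foldl_cons, ih, List.mem_cons]
      constructor
      · rintro (h | ⟨q, hq, hqp, hpre⟩)
        · by_cases hc : wp.2 < b ∧ wp.1.isPrefixOf s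
          · rw [if_pos hc] at h
            exact Or.inr ⟨wp, Or.inl rfl, h, List.isPrefixOf_iff_prefix.mp hc.2⟩
          · rw [if_neg hc] at h; exact Or.inl h
        · exact Or.inr ⟨q, Or.inr hq, hqp, hpre⟩
      · rintro (h | ⟨q, (rfl | hq), hqp, hpre⟩)
        · left; split_ifs with hc
          · omega
          · exact h
        · left; rw [List.isPrefixOf_iff_prefix.mpr hpre] at *
          split_ifs with hc
          · exact hqp
          · simp at hc; omega
        · exact Or.inr ⟨q, hq, hqp, hpre⟩

theorem pvScan_le_iff (l : List Char) (b p : Nat) :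
    pvScan l b ≤ p ↔ (b ≤ p ∨ ∃ wp ∈ pvKeywords, wp.2 ≤ p ∧ wp.1 <:+: l) := by
  induction l generalizing b with
  | nil =>
      simp only [pvScan]
      constructor
      · exact Or.inl
      · rintro (h | ⟨wp, hm, hp, hinf⟩)
        · exact h
        · exfalso
          have : wp.1 = [] := List.eq_nil_of_infix_nil hinf
          fin_cases hm <;> simp_all
  | cons c t ih =>
      simp only [pvScan, ih]
      rw [show pvStep (c :: t) b ≤ p ↔ _ from pvFold_le_iff (c :: t) pvKeywords b p]
      constructor
      · rintro ((h | ⟨wp, hm, hp, hpre⟩) | ⟨wp, hm, hp, hinf⟩)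
        · exact Or.inl h
        · exact Or.inr ⟨wp, hm, hp, hpre.isInfix⟩
        · exact Or.inr ⟨wp, hm, hp, List.infix_cons hinf⟩
      · rintro (h | ⟨wp, hm, hp, hinf⟩)
        · exact Or.inl (Or.inl h)
        · rcases List.infix_cons_iff.mp hinf with hpre | hinf'
          · exact Or.inl (Or.inr ⟨wp, hm, hp, hpre⟩)
          · exact Or.inr ⟨wp, hm, hp, hinf'⟩

-- ===== VERDICT (by name: the statement is the Claim_ definition above) =====
theorem categorize_page_py_spec : Claim_equal_categorize_page_py := by
  intro text title url _
  unfold Spec_categorize_page_py categorize_page_py categorize_page_py_alt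
  set combined : List Char :=
    PySem.Chars.lower ((title.getD "").toList ++ ' ' :: PySem.Chars.slice text.toList none (some 2000)) with hc
  have hscan := fun p => pvScan_le_iff combined 4 p
  have hkw : ∀ p : Nat, (∃ wp ∈ pvKeywords, wp.2 ≤ p ∧ wp.1 <:+: combined) ↔
      ((pvKeywords.filter (fun wp => wp.2 ≤ p)).any (fun wp => PySem.Chars.isIn wp.1 combined)) = true := by
    intro p
    simp [List.any_eq_true, PySem.Chars.isIn_iff_infix]
  have hle4 : pvScan combined 4 ≤ 4 := (hscan 4).mpr (Or.inl le_rfl)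
  have e0 : (pvScan combined 4 ≤ 0) ↔
      (["forum", "thread", "reply", "post", "discussion"].any
        (fun w => PySem.Chars.isIn w.toList combined)) = true := by
    rw [hscan 0, hkw 0]
    simp [pvKeywords, List.any_eq_true, PySem.Chars.isIn_iff_infix, or_assoc]
  have e1 : (pvScan combined 4 ≤ 1) ↔
      ((["forum", "thread", "reply", "post", "discussion"].any
        (fun w => PySem.Chars.isIn w.toList combined)) = true ∨
       (["vendor", "listing", "add to cart", "escrow", "marketplace"].any
        (fun w => PySem.Chars.isIn w.toList combined)) = true) := by
    rw [hscan 1, hkw 1]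
    simp [pvKeywords, List.any_eq_true, PySem.Chars.isIn_iff_infix, or_assoc]
  have e2 : (pvScan combined 4 ≤ 2) ↔
      ((["forum", "thread", "reply", "post", "discussion"].any
        (fun w => PySem.Chars.isIn w.toList combined)) = true ∨
       (["vendor", "listing", "add to cart", "escrow", "marketplace"].any
        (fun w => PySem.Chars.isIn w.toList combined)) = true ∨
       (["paste", "hastebin", "pastebin"].any
        (fun w => PySem.Chars.isIn w.toList combined)) = true) := by
    rw [hscan 2, hkw 2]
    simp [pvKeywords, List.any_eq_true, PySem.Chars.isIn_iff_infix, or_assoc]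
  have e3 : (pvScan combined 4 ≤ 3) ↔
      ((["forum", "thread", "reply", "post", "discussion"].any
        (fun w => PySem.Chars.isIn w.toList combined)) = true ∨
       (["vendor", "listing", "add to cart", "escrow", "marketplace"].any
        (fun w => PySem.Chars.isIn w.toList combined)) = true ∨
       (["paste", "hastebin", "pastebin"].any
        (fun w => PySem.Chars.isIn w.toList combined)) = true ∨
       (["hosting", "bulletproof", "server", "vps"].any
        (fun w => PySem.Chars.isIn w.toList combined)) = true) := by
    rw [hscan 3, hkw 3]
    simp [pvKeywords, List.any_eq_true, PySem.Chars.isIn_iff_infix, or_assoc]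
  by_cases h0 : (["forum", "thread", "reply", "post", "discussion"].any
      (fun w => PySem.Chars.isIn w.toList combined)) = true
  · have hv : pvScan combined 4 = 0 := Nat.le_zero.mp (e0.mpr h0)
    simp [h0, hv, pvCats]
  · by_cases h1 : (["vendor", "listing", "add to cart", "escrow", "marketplace"].any
        (fun w => PySem.Chars.isIn w.toList combined)) = true
    · have hle : pvScan combined 4 ≤ 1 := e1.mpr (Or.inr h1)
      have hgt : ¬ pvScan combined 4 ≤ 0 := fun h => h0 (e0.mp h)
      have hv : pvScan combined 4 = 1 := by omega
      simp [h0, h1, hv, pvCats]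
    · by_cases h2 : (["paste", "hastebin", "pastebin"].any
          (fun w => PySem.Chars.isIn w.toList combined)) = true
      · have hle : pvScan combined 4 ≤ 2 := e2.mpr (Or.inr (Or.inr h2))
        have hgt : ¬ pvScan combined 4 ≤ 1 := fun h => (e1.mp h).elim h0 h1
        have hv : pvScan combined 4 = 2 := by omega
        simp [h0, h1, h2, hv, pvCats]
      · by_cases h3 : (["hosting", "bulletproof", "server", "vps"].any
            (fun w => PySem.Chars.isIn w.toList combined)) = true
        · have hle : pvScan combined 4 ≤ 3 := e3.mpr (Or.inr (Or.inr (Or.inr h3)))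
          have hgt : ¬ pvScan combined 4 ≤ 2 := fun h => (e2.mp h).elim h0 (fun h' => h'.elim h1 h2)
          have hv : pvScan combined 4 = 3 := by omega
          simp [h0, h1, h2, h3, hv, pvCats]
        · have hgt : ¬ pvScan combined 4 ≤ 3 :=
            fun h => (e3.mp h).elim h0 (fun h' => h'.elim h1 (fun h'' => h''.elim h2 h3))
          have hv : pvScan combined 4 = 4 := by omega
          simp [h0, h1, h2, h3, hv, pvCats]
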